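-- pv_equiv track=rewrite | github.com/KellyGong/RESDSQL | utils/load_dataset.py | deal_column_with_value
-- ===== SOURCE A (Python) =====
-- def deal_column_with_value(column_list):
--     merge_indexes = []
--     for i, column_name in enumerate(column_list):
--         if ')' in column_name and '.' not in column_name:
--             # search the column name has the '('
--             for j in range(i-1, -1, -1):
--                 if '(' in column_list[j]:
--                     merge_indexes.append((j, i))
--                     break
--
--     # merge the indexes in the list values:
--     for merge_index in merge_indexes[::-1]:
--         append_str = column_list.pop(merge_index[1])
--         for i in range(merge_index[1] - 1, merge_index[0], -1):
--             append_str = column_list.pop(i) + ' , ' + append_str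
--         column_list[merge_index[0]] += ' , ' + append_str
--
--     return column_list
-- ===== SOURCE B (Python) =====
-- def deal_column_with_value(column_list):
--     # One forward pass: keep the latest '('-column as the head of an open group,
--     # buffer the columns after it, and fold a ')'-column (without '.') into the group.
--     done = []
--     head = None
--     tail = []
--     for c in column_list:
--         if ')' in c and '.' not in c and head is not None:
--             head = ' , '.join([head] + tail + [c])
--             tail = []
--         elif '(' in c:
--             if head is not None:
--                 done.append(head)
--                 done.extend(tail)
--             head = c
--             tail = []
--         else:
--             if head is not None:
--                 tail.append(c)
--             else:
--                 done.append(c)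
--     if head is not None:
--         done.append(head)
--         done.extend(tail)
--     return done
-- ===== Notes on version B (the rewrite author's own statement) =====
-- stated objective: alternative
-- what changed: B replaces A's per-')'-column backward scan plus a second reverse pass of pop-based index arithmetic by a single forward pass that keeps the latest '('-column as the head of an open group, buffers the columns after it, and folds each ')'-column (without '.') into the group.
-- outside the precondition, e.g. on deal_column_with_value(['(a', 'x)', 'y)']): A raises IndexError, B returns ['(a , x) , y)']
import Mathlib
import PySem

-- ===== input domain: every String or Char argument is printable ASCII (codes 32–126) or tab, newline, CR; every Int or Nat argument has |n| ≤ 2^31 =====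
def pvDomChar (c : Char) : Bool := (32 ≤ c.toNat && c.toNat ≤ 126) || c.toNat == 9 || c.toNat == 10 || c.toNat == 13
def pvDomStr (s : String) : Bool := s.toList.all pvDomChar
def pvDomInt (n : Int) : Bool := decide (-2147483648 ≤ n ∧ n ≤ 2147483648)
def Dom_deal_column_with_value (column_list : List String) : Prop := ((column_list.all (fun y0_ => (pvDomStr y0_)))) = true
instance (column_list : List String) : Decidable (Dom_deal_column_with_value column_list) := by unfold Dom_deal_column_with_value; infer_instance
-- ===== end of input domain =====

-- B replaces A's two passes (a backward scan per ')'-column, then a reverse pass of pop-based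
-- index arithmetic) by one forward pass that keeps the latest '('-column as head of an open
-- group; A mutates its argument in place (Python pops), the equivalence is about the RETURN value.

-- ===== PORT A =====
-- ')' in s / '.' in s / '(' in s  (substring test; exact via PySem.Str.isIn)
def pvHasOpen (s : String) : Bool := PySem.Str.isIn "(" s
def pvHasClose (s : String) : Bool := PySem.Str.isIn ")" s
def pvHasDot (s : String) : Bool := PySem.Str.isIn "." s
-- `')' in column_name and '.' not in column_name`
def pvFlag (s : String) : Bool := pvHasClose s && !pvHasDot s

def deal_column_with_value (column_list : List String) : List String :=
  -- phase 1: the inner backward scan with break = find? over the countdown range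
  let merge_indexes : List (Int × Int) :=
    (PySem.List.enumerate column_list 0).foldl (fun acc p =>
      if pvFlag p.2 then
        match (PySem.List.pyRange (p.1 - 1) (-1) (-1)).find?
            (fun j => pvHasOpen (PySem.List.pyGetD column_list j "")) with
        | some j => acc ++ [(j, p.1)]
        | none => acc
      else acc) []
  -- phase 2: merge_indexes[::-1] is .reverse (PySem.List.slice?_none_none_neg_one)
  merge_indexes.reverse.foldl (fun l mi =>
    match PySem.List.pop? l mi.2 with
    | none => l  -- Python raises IndexError here (outside Pre_)
    | some (a0, l1) =>
      let r := (PySem.List.pyRange (mi.2 - 1) mi.1 (-1)).foldl (fun st i =>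
        match PySem.List.pop? st.2 i with
        | none => st  -- Python raises IndexError here (outside Pre_)
        | some q => (q.1 ++ " , " ++ st.1, q.2)) (a0, l1)
      match PySem.List.pyGet? r.2 mi.1 with
      | none => r.2  -- Python raises IndexError here (outside Pre_)
      | some old => PySem.List.pySetD r.2 mi.1 (old ++ " , " ++ r.1)) column_list

-- ===== PORT B =====
-- ' , '.join(parts)  (exact: "" on the empty list, no separator around a single part)
def pvJoinSep (l : List String) : String :=
  match l with
  | [] => ""
  | x :: xs => xs.foldl (fun a b => a ++ " , " ++ b) x

-- the body of B's single forward loop, state (done, head, tail)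
def pvStepB (st : List String × Option String × List String) (c : String) :
    List String × Option String × List String :=
  match st with
  | (done, some h, tail) =>
    if pvFlag c then (done, some (pvJoinSep (h :: (tail ++ [c]))), [])
    else if pvHasOpen c then (done ++ h :: tail, some c, [])
    else (done, some h, tail ++ [c])
  | (done, none, tail) =>
    if pvHasOpen c then (done, some c, [])
    else (done ++ [c], none, tail)

-- flush of the open group after the loop
def pvFinishB (st : List String × Option String × List String) : List String :=
  match st with
  | (done, some h, tail) => done ++ h :: tail
  | (done, none, _) => done

def deal_column_with_value_alt (column_list : List String) : List String :=
  pvFinishB (column_list.foldl pvStepB ([], none, []))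

-- ===== PRECONDITION & SPEC =====
-- Pre_ excludes lists in which two ')'-columns (without '.') would be matched to '('-columns in
-- interleaved or shared positions: there A's second pass pops stale indices and raises IndexError
-- or returns an accidentally re-merged value (see the cites in claim.json).
def Pre_deal_column_with_value (column_list : List String) : Prop :=
  ∀ i2 < column_list.length, ∀ i1 < i2,
    (pvFlag (column_list.getD i1 "") = true ∧ pvFlag (column_list.getD i2 "") = true ∧
      ∃ j < i1, pvHasOpen (column_list.getD j "") = true) →
    ∃ k < i2, i1 ≤ k ∧ pvHasOpen (column_list.getD k "") = true
instance (column_list : List String) : Decidable (Pre_deal_column_with_value column_list) := by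
  unfold Pre_deal_column_with_value; infer_instance

def pvWitness_deal_column_with_value : List String := ["avg ( age", "weight )", "name"]

def Spec_deal_column_with_value (column_list : List String) (out : List String) : Prop :=
  out = deal_column_with_value_alt column_list
instance (column_list : List String) (out : List String) :
    Decidable (Spec_deal_column_with_value column_list out) := by
  unfold Spec_deal_column_with_value; infer_instance

-- ===== CLAIM (what is proved, stated in full; the proofs are below) =====
def Claim_equal_deal_column_with_value : Prop :=
  ∀ (column_list : List String), Dom_deal_column_with_value column_list →
    Pre_deal_column_with_value column_list →
    Spec_deal_column_with_value column_list (deal_column_with_value column_list)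

-- ===== LEMMAS AND PROOFS =====

-- ---- the reference model of A (proof-side only) ----

-- merging columns j..i of l into position j
def pvMergeAtN (l : List String) (j i : Nat) : List String :=
  l.take j ++ [pvJoinSep ((l.drop j).take (i + 1 - j))] ++ l.drop (i + 1)

def pvPhase2 (l : List String) (M : List (Nat × Nat)) : List String :=
  M.foldr (fun mi acc => pvMergeAtN acc mi.1 mi.2) l

-- greatest j < i with '(' in l[j]
def pvFindBack (l : List String) (i : Nat) : Option Nat :=
  ((List.range i).reverse).find? (fun j => pvHasOpen (l.getD j ""))

def pvChunk (l : List String) (i : Nat) : List (Nat × Nat) :=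
  if pvFlag (l.getD i "") then
    (match pvFindBack l i with | some j => [(j, i)] | none => [])
  else []

def pvMergeIdxN (l : List String) : List (Nat × Nat) :=
  (List.range l.length).flatMap (pvChunk l)

def pvModelA (l : List String) : List String := pvPhase2 l (pvMergeIdxN l)

-- abbreviation for the fold body of pvJoinSep
def pvCat (a b : String) : String := a ++ " , " ++ b

theorem pvJoinSep_cons (x : String) (xs : List String) :
    pvJoinSep (x :: xs) = xs.foldl pvCat x := by
  rfl

theorem pvFoldlCat_pull (xs : List String) (a b : String) :
    xs.foldl pvCat (a ++ b) = a ++ xs.foldl pvCat b := by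
  induction xs generalizing b with
  | nil => rfl
  | cons y ys ih =>
    simp only [List.foldl_cons, pvCat, String.append_assoc]
    exact ih _

theorem pvJoinSep_snoc (x : String) (xs : List String) (s : String) :
    pvJoinSep ((x :: xs) ++ [s]) = pvJoinSep (x :: xs) ++ " , " ++ s := by
  simp [pvJoinSep, List.foldl_append, String.append_assoc]

theorem pvJoinSep_cons_cons (x y : String) (xs : List String) :
    pvJoinSep (x :: y :: xs) = x ++ " , " ++ pvJoinSep (y :: xs) := by
  have h1 : pvCat x y = x ++ (" , " ++ y) := by simp [pvCat, String.append_assoc]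
  have h2 : (" , " : String) ++ y = " , " ++ y := rfl
  calc pvJoinSep (x :: y :: xs) = xs.foldl pvCat (pvCat x y) := rfl
    _ = xs.foldl pvCat (x ++ (" , " ++ y)) := by rw [h1]
    _ = x ++ xs.foldl pvCat (" , " ++ y) := pvFoldlCat_pull xs x _
    _ = x ++ (" , " ++ xs.foldl pvCat y) := by rw [pvFoldlCat_pull xs " , " y]
    _ = x ++ " , " ++ pvJoinSep (y :: xs) := by rw [pvJoinSep_cons, String.append_assoc]

theorem pvOpen_append_left (a b : String) (h : pvHasOpen a = true) :
    pvHasOpen (a ++ b) = true := by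
  unfold pvHasOpen at *
  rw [PySem.Str.isIn_iff_infix] at *
  rw [String.toList_append]
  exact h.trans (List.prefix_append _ _).isInfix

theorem pvOpen_joinSep_cons (h : String) (xs : List String) (hh : pvHasOpen h = true) :
    pvHasOpen (pvJoinSep (h :: xs)) = true := by
  cases xs with
  | nil => exact hh
  | cons y ys =>
    rw [pvJoinSep_cons_cons]
    exact pvOpen_append_left _ _ (pvOpen_append_left _ _ hh)

-- ---- findBack lemmas ----

theorem pvFindBack_zero (l : List String) : pvFindBack l 0 = none := by
  rfl

theorem pvFindBack_succ (l : List String) (i : Nat) :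
    pvFindBack l (i + 1) =
      if pvHasOpen (l.getD i "") then some i else pvFindBack l i := by
  unfold pvFindBack
  rw [List.range_succ, List.reverse_append]
  cases h : pvHasOpen (l.getD i "") with
  | true =>
    rw [List.getD_eq_getElem?_getD] at h
    simp [h]
  | false =>
    rw [List.getD_eq_getElem?_getD] at h
    simp [h]

theorem pvFindBack_none_iff (l : List String) (i : Nat) :
    pvFindBack l i = none ↔ ∀ t < i, pvHasOpen (l.getD t "") = false := by
  induction i with
  | zero => simp [pvFindBack_zero]
  | succ n ih =>
    rw [pvFindBack_succ]
    cases h : pvHasOpen (l.getD n "") with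
    | true =>
      simp only [if_true]
      constructor
      · intro hc; cases hc
      · intro hall; rw [hall n (Nat.lt_succ_self n)] at h; cases h
    | false =>
      simp only [Bool.false_eq_true, if_false, ih]
      constructor
      · intro hall t ht
        rcases Nat.lt_succ_iff_lt_or_eq.mp ht with h' | h'
        · exact hall t h'
        · subst h'; exact h
      · intro hall t ht; exact hall t (Nat.lt_succ_of_lt ht)

theorem pvFindBack_some (l : List String) : ∀ i j, pvFindBack l i = some j →
    j < i ∧ pvHasOpen (l.getD j "") = true := by
  intro i
  induction i with
  | zero => intro j h; rw [pvFindBack_zero] at h; cases h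
  | succ n ih =>
    intro j h
    rw [pvFindBack_succ] at h
    by_cases ho : pvHasOpen (l.getD n "") = true
    · rw [if_pos ho] at h
      injection h with h
      subst h
      exact ⟨Nat.lt_succ_self n, ho⟩
    · rw [if_neg ho] at h
      rcases ih j h with ⟨h1, h2⟩
      exact ⟨Nat.lt_succ_of_lt h1, h2⟩

theorem pvFindBack_ge (l : List String) (i k : Nat) (hk : k < i)
    (ho : pvHasOpen (l.getD k "") = true) :
    ∃ j, pvFindBack l i = some j ∧ k ≤ j := by
  induction i with
  | zero => cases hk
  | succ n ih =>
    rw [pvFindBack_succ]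
    by_cases h : pvHasOpen (l.getD n "") = true
    · exact ⟨n, by rw [if_pos h], Nat.lt_succ_iff.mp hk⟩
    · rw [if_neg h]
      have hkn : k < n := by
        rcases Nat.lt_succ_iff_lt_or_eq.mp hk with h' | h'
        · exact h'
        · subst h'; exact absurd ho h
      exact ih hkn

-- ---- extra join helpers ----

theorem pvJoinSep_cons_ne (x : String) (t : List String) (ht : t ≠ []) :
    pvJoinSep (x :: t) = x ++ " , " ++ pvJoinSep t := by
  cases t with
  | nil => exact absurd rfl ht
  | cons y ys => exact pvJoinSep_cons_cons x y ys

theorem pvJoinSep_foldr (xs : List String) (s : String) :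
    pvJoinSep (xs ++ [s]) = xs.foldr (fun x acc => x ++ " , " ++ acc) s := by
  induction xs with
  | nil => rfl
  | cons x xs ih =>
    rw [List.cons_append, pvJoinSep_cons_ne x (xs ++ [s]) (by simp), ih, List.foldr_cons]

-- ===== port A = model =====

theorem pvRange_countdown (i : Nat) :
    PySem.List.pyRange ((i : Int) - 1) (-1) (-1) =
      ((List.range i).reverse).map (fun k : Nat => (k : Int)) := by
  induction i with
  | zero =>
    rw [show ((0 : Nat) : Int) - 1 = -1 by simp]
    rw [PySem.List.pyRange_neg_one_eq_nil (le_refl _)]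
    rfl
  | succ n ih =>
    rw [show ((n + 1 : Nat) : Int) - 1 = (n : Int) by push_cast; ring]
    rw [PySem.List.pyRange_neg_one_cons (by omega)]
    rw [ih, List.range_succ, List.reverse_append]
    simp

theorem pvFind_cast (lst : List Nat) (l : List String) :
    (lst.map (fun k : Nat => (k : Int))).find? (fun j => pvHasOpen (PySem.List.pyGetD l j "")) =
      (lst.find? (fun j => pvHasOpen (l.getD j ""))).map (fun j : Nat => (j : Int)) := by
  induction lst with
  | nil => rfl
  | cons a t ih =>
    simp only [List.map_cons, List.find?_cons]
    have hg : pvHasOpen (PySem.List.pyGetD l ((a : Nat) : Int) "") = pvHasOpen (l.getD a "") := by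
      simp
    rw [hg]
    cases pvHasOpen (l.getD a "") <;> simp [ih]

theorem pvFindBack_port (l : List String) (i : Nat) :
    (PySem.List.pyRange ((i : Int) - 1) (-1) (-1)).find?
        (fun j => pvHasOpen (PySem.List.pyGetD l j "")) =
      (pvFindBack l i).map (fun j : Nat => (j : Int)) := by
  rw [pvRange_countdown]
  exact pvFind_cast _ _

theorem pvPhase1_gen (l : List String) :
    ∀ (xs : List String) (st : Nat) (acc : List (Int × Int)),
    (∀ r, r < xs.length → xs.getD r "" = l.getD (st + r) "") →
    (PySem.List.enumerate xs (st : Int)).foldl (fun acc (p : Int × String) =>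
      if pvFlag p.2 then
        match (PySem.List.pyRange (p.1 - 1) (-1) (-1)).find?
            (fun j => pvHasOpen (PySem.List.pyGetD l j "")) with
        | some j => acc ++ [(j, p.1)]
        | none => acc
      else acc) acc =
    acc ++ (List.range xs.length).flatMap
      (fun r => (pvChunk l (st + r)).map (fun q => ((q.1 : Int), (q.2 : Int)))) := by
  intro xs
  induction xs with
  | nil => intro st acc _; simp [PySem.List.enumerate_nil]
  | cons x xs ih =>
    intro st acc hco
    rw [PySem.List.enumerate_cons, List.foldl_cons]
    have hx : x = l.getD st "" := by
      have := hco 0 (by simp)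
      simpa using this
    have hstep : (if pvFlag x then
        match (PySem.List.pyRange ((st : Int) - 1) (-1) (-1)).find?
            (fun j => pvHasOpen (PySem.List.pyGetD l j "")) with
        | some j => acc ++ [(j, (st : Int))]
        | none => acc
      else acc) = acc ++ (pvChunk l st).map (fun q => ((q.1 : Int), (q.2 : Int))) := by
      rw [pvFindBack_port l st]
      unfold pvChunk
      rw [← hx]
      cases hf : pvFlag x with
      | false => simp
      | true =>
        cases hfb : pvFindBack l st with
        | none => simp
        | some j => simp
    rw [hstep]
    have hcast : (st : Int) + 1 = ((st + 1 : Nat) : Int) := by push_cast; ring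
    rw [hcast, ih (st + 1) _ (fun r hr => by
      have := hco (r + 1) (by simpa using Nat.succ_lt_succ hr)
      simpa [Nat.add_assoc, Nat.add_comm 1 r, Nat.add_left_comm] using this)]
    rw [List.length_cons, List.range_succ_eq_map, List.flatMap_cons, List.flatMap_map]
    simp only [Nat.add_zero, List.append_assoc]
    congr 2
    apply List.flatMap_congr
    intro r _
    congr 2
    omega

theorem pvPhase1_port (l : List String) :
    (PySem.List.enumerate l 0).foldl (fun acc (p : Int × String) =>
      if pvFlag p.2 then
        match (PySem.List.pyRange (p.1 - 1) (-1) (-1)).find?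
            (fun j => pvHasOpen (PySem.List.pyGetD l j "")) with
        | some j => acc ++ [(j, p.1)]
        | none => acc
      else acc) ([] : List (Int × Int)) =
    (pvMergeIdxN l).map (fun q => ((q.1 : Int), (q.2 : Int))) := by
  have h := pvPhase1_gen l l 0 [] (fun r _ => by simp)
  rw [show ((0 : Nat) : Int) = (0 : Int) by simp] at h
  rw [h]
  unfold pvMergeIdxN
  rw [List.map_flatMap]
  simp

theorem pvPop_take (l suf : List String) (n : Nat) (h : n < l.length) :
    PySem.List.pop? (l.take (n + 1) ++ suf) ((n : Nat) : Int) =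
      some (l[n], l.take n ++ suf) := by
  have hlen : n < (l.take (n + 1) ++ suf).length := by
    simp [List.length_append, List.length_take]; omega
  rw [PySem.List.pop?_natCast _ _ hlen]
  have htl : n < (l.take (n + 1)).length := by simp [List.length_take]; omega
  congr 1
  refine Prod.ext ?_ ?_
  · show (l.take (n + 1) ++ suf)[n] = l[n]
    rw [List.getElem_append_left htl, List.getElem_take]
  · show (l.take (n + 1) ++ suf).eraseIdx n = l.take n ++ suf
    rw [List.eraseIdx_append_of_lt_length htl suf]
    congr 1
    rw [List.eraseIdx_eq_take_drop_succ]
    simp [List.take_take]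

theorem pvTakeDropSnoc (l : List String) (j d : Nat) (h : j + d + 1 < l.length) :
    (l.drop (j + 1)).take (d + 1) = (l.drop (j + 1)).take d ++ [l[j + d + 1]] := by
  rw [List.take_add_one]
  congr 1
  rw [List.getElem?_drop]
  rw [show j + 1 + d = j + d + 1 from by omega]
  rw [List.getElem?_eq_getElem h]
  rfl

theorem pvInnerLoop (l : List String) (j : Nat) :
    ∀ (d : Nat) (s : String) (suf : List String), j + d < l.length →
    (PySem.List.pyRange ((j + d : Nat) : Int) ((j : Nat) : Int) (-1)).foldl
      (fun (st : String × List String) i => match PySem.List.pop? st.2 i with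
        | none => st
        | some q => (q.1 ++ " , " ++ st.1, q.2)) (s, l.take (j + d + 1) ++ suf) =
    (((l.drop (j + 1)).take d).foldr (fun x acc => x ++ " , " ++ acc) s,
      l.take (j + 1) ++ suf) := by
  intro d
  induction d with
  | zero =>
    intro s suf _
    rw [show ((j + 0 : Nat) : Int) = (j : Int) by simp]
    rw [PySem.List.pyRange_neg_one_eq_nil (le_refl _)]
    simp
  | succ d ih =>
    intro s suf h
    rw [show ((j + (d + 1) : Nat) : Int) = ((j + d + 1 : Nat) : Int) by push_cast; ring]
    rw [PySem.List.pyRange_neg_one_cons (by push_cast; omega)]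
    rw [List.foldl_cons]
    have hp : PySem.List.pop? (l.take ((j + d + 1) + 1) ++ suf) ((j + d + 1 : Nat) : Int) =
        some (l[j + d + 1], l.take (j + d + 1) ++ suf) := pvPop_take l suf (j + d + 1) h
    rw [show ((j + d + 1 : Nat) : Int) - 1 = ((j + d : Nat) : Int) by push_cast; ring]
    rw [show l.take (j + (d + 1) + 1) = l.take ((j + d + 1) + 1) by congr 1]
    rw [hp]
    rw [ih (l[j + d + 1] ++ " , " ++ s) suf (by omega)]
    rw [pvTakeDropSnoc l j d h, List.foldr_append]
    rfl

theorem pvStepA_port (l : List String) (j i : Nat) (hji : j < i) (hi : i < l.length) :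
    (fun (l : List String) (mi : Int × Int) =>
      match PySem.List.pop? l mi.2 with
      | none => l
      | some (a0, l1) =>
        let r := (PySem.List.pyRange (mi.2 - 1) mi.1 (-1)).foldl (fun st i =>
          match PySem.List.pop? st.2 i with
          | none => st
          | some q => (q.1 ++ " , " ++ st.1, q.2)) (a0, l1)
        match PySem.List.pyGet? r.2 mi.1 with
        | none => r.2
        | some old => PySem.List.pySetD r.2 mi.1 (old ++ " , " ++ r.1)) l ((j : Int), (i : Int)) =
    pvMergeAtN l j i := by
  simp only []
  obtain ⟨d, hd⟩ : ∃ d, i = j + d + 1 := ⟨i - j - 1, by omega⟩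
  subst hd
  rw [PySem.List.pop?_natCast _ _ hi]
  simp only []
  rw [show l.eraseIdx (j + d + 1) = l.take ((j + d) + 1) ++ l.drop ((j + d + 1) + 1) by
    rw [List.eraseIdx_eq_take_drop_succ]]
  rw [show ((j + d + 1 : Nat) : Int) - 1 = ((j + d : Nat) : Int) by push_cast; ring]
  rw [pvInnerLoop l j d l[j + d + 1] (l.drop ((j + d + 1) + 1)) (by omega)]
  simp only []
  have hj1 : j < (l.take (j + 1)).length := by simp [List.length_take]; omega
  have hget : PySem.List.pyGet? (l.take (j + 1) ++ l.drop (j + d + 1 + 1)) ((j : Nat) : Int) =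
      some l[j] := by
    rw [PySem.List.pyGet?_natCast]
    rw [List.getElem?_append_left hj1]
    rw [List.getElem?_take_of_lt (by omega), List.getElem?_eq_getElem (by omega)]
  rw [hget]
  dsimp only []
  rw [PySem.List.pySetD_natCast]
  unfold pvMergeAtN
  rw [List.set_append_left _ _ hj1]
  rw [List.set_eq_take_cons_drop _ hj1]
  rw [List.take_take, Nat.min_eq_left (by omega)]
  rw [show (l.take (j + 1)).drop (j + 1) = [] by simp]
  have hdrop : l.drop j = l[j] :: l.drop (j + 1) := List.drop_eq_getElem_cons (by omega)
  rw [hdrop]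
  rw [show j + d + 1 + 1 - j = d + 2 by omega]
  congr 2
  rw [List.take_succ_cons, pvTakeDropSnoc l j d hi]
  rw [pvJoinSep_cons_ne _ _ (by simp), pvJoinSep_foldr]

-- validity of an interval list wrt a length
def pvChain (M : List (Nat × Nat)) (n : Nat) : Prop :=
  M.Pairwise (fun a b => a.2 ≤ b.1) ∧ (∀ q ∈ M, q.1 < q.2) ∧ (∀ q ∈ M, q.2 < n)

theorem pvLength_mergeAtN (l : List String) (j i : Nat) (hji : j < i) (hi : i < l.length) :
    (pvMergeAtN l j i).length = l.length - (i - j) := by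
  simp only [pvMergeAtN, List.length_append, List.length_take, List.length_drop,
    List.length_cons, List.length_nil]
  omega

theorem pvPhase2_port (M : List (Nat × Nat)) : ∀ (l : List String), pvChain M l.length →
    ((M.map (fun q => ((q.1 : Int), (q.2 : Int)))).reverse).foldl (fun l mi =>
      match PySem.List.pop? l mi.2 with
      | none => l
      | some (a0, l1) =>
        let r := (PySem.List.pyRange (mi.2 - 1) mi.1 (-1)).foldl (fun st i =>
          match PySem.List.pop? st.2 i with
          | none => st
          | some q => (q.1 ++ " , " ++ st.1, q.2)) (a0, l1)
        match PySem.List.pyGet? r.2 mi.1 with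
        | none => r.2
        | some old => PySem.List.pySetD r.2 mi.1 (old ++ " , " ++ r.1)) l =
    pvPhase2 l M := by
  induction M using List.reverseRecOn with
  | nil => intro l _; rfl
  | append_singleton M' q ih =>
    intro l h
    obtain ⟨hpw, hlt, hbnd⟩ := h
    have hq1 : q.1 < q.2 := hlt q (by simp)
    have hq2 : q.2 < l.length := hbnd q (by simp)
    have hple : ∀ p ∈ M', p.2 ≤ q.1 := by
      rw [List.pairwise_append] at hpw
      intro p hp
      exact hpw.2.2 p hp q (by simp)
    have hchain' : pvChain M' (pvMergeAtN l q.1 q.2).length := by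
      refine ⟨(List.pairwise_append.mp hpw).1, fun p hp => hlt p (by simp [hp]), ?_⟩
      intro p hp
      rw [pvLength_mergeAtN l q.1 q.2 hq1 hq2]
      have := hple p hp
      omega
    rw [List.map_append, List.reverse_append, List.map_cons, List.map_nil,
      List.reverse_cons, List.reverse_nil, List.nil_append, List.singleton_append,
      List.foldl_cons]
    unfold pvPhase2
    rw [List.foldr_append]
    simp only [List.foldr_cons, List.foldr_nil]
    have hstep := pvStepA_port l q.1 q.2 hq1 hq2
    have hih := ih (pvMergeAtN l q.1 q.2) hchain'
    unfold pvPhase2 at hih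
    dsimp only [] at hstep hih ⊢
    rw [hstep]
    exact hih

theorem pvChunk_mem (l : List String) (i : Nat) (q : Nat × Nat) (h : q ∈ pvChunk l i) :
    pvFlag (l.getD i "") = true ∧ pvFindBack l i = some q.1 ∧ q.2 = i := by
  unfold pvChunk at h
  by_cases hf : pvFlag (l.getD i "") = true
  · rw [if_pos hf] at h
    cases hfb : pvFindBack l i with
    | none => rw [hfb] at h; cases h
    | some j =>
      rw [hfb] at h
      simp at h
      subst h
      exact ⟨hf, by simpa using hfb, rfl⟩
  · rw [if_neg hf] at h
    cases h

theorem pvChain_mergeIdxN (l : List String) (hp : Pre_deal_column_with_value l) :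
    pvChain (pvMergeIdxN l) l.length := by
  have hmem : ∀ q ∈ pvMergeIdxN l, q.1 < q.2 ∧ q.2 < l.length := by
    intro q hq
    rw [pvMergeIdxN, List.mem_flatMap] at hq
    obtain ⟨i, hi, hqc⟩ := hq
    rw [List.mem_range] at hi
    obtain ⟨_, hfb, hq2⟩ := pvChunk_mem l i q hqc
    have := pvFindBack_some l i q.1 hfb
    exact ⟨by omega, by omega⟩
  refine ⟨?_, fun q hq => (hmem q hq).1, fun q hq => (hmem q hq).2⟩
  unfold pvMergeIdxN
  rw [List.pairwise_flatMap]
  constructor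
  · intro a _
    unfold pvChunk
    split
    · cases pvFindBack l a <;> simp
    · simp
  · refine List.Pairwise.imp_of_mem ?_ (List.pairwise_lt_range)
    intro i1 i2 h1 h2 hlt x hx y hy
    rw [List.mem_range] at h1 h2
    obtain ⟨hf1, hfb1, hx2⟩ := pvChunk_mem l i1 x hx
    obtain ⟨hf2, hfb2, hy2⟩ := pvChunk_mem l i2 y hy
    obtain ⟨hj1lt, hj1o⟩ := pvFindBack_some l i1 x.1 hfb1
    obtain ⟨k, hk2, hk1, hko⟩ := hp i2 h2 i1 hlt ⟨hf1, hf2, ⟨x.1, hj1lt, hj1o⟩⟩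
    obtain ⟨j, hfbj, hkj⟩ := pvFindBack_ge l i2 k hk2 hko
    rw [hfb2] at hfbj
    injection hfbj with hfbj
    subst hfbj
    omega

theorem pvPortA_model (l : List String) (hp : Pre_deal_column_with_value l) :
    deal_column_with_value l = pvModelA l := by
  unfold deal_column_with_value pvModelA
  dsimp only []
  rw [pvPhase1_port l]
  exact pvPhase2_port (pvMergeIdxN l) l (pvChain_mergeIdxN l hp)

-- ===== structural lemmas about the model =====

theorem pvGetD_append_right (p z : List String) (r : Nat) :
    (p ++ z).getD (p.length + r) "" = z.getD r "" := by
  rw [List.getD_eq_getElem?_getD, List.getD_eq_getElem?_getD]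
  rw [List.getElem?_append_right (by omega)]
  congr 1
  congr 1
  omega

theorem pvChunk_zero (l : List String) : pvChunk l 0 = [] := by
  unfold pvChunk
  rw [pvFindBack_zero]
  split <;> rfl

-- scanning from p.length + r: first over the z-part, then over the p-part
theorem pvFindBack_append (p z : List String) : ∀ (r : Nat),
    pvFindBack (p ++ z) (p.length + r) =
      match pvFindBack z r with
      | some t => some (p.length + t)
      | none => pvFindBack (p ++ z) p.length := by
  intro r
  induction r with
  | zero => rw [pvFindBack_zero]; simp
  | succ r ih =>
    rw [show p.length + (r + 1) = (p.length + r) + 1 from rfl, pvFindBack_succ,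
      pvFindBack_succ, pvGetD_append_right]
    cases ho : pvHasOpen (z.getD r "") with
    | true => simp
    | false => simpa using ih

-- below the head h (with '(') and a '('-free buf, the scan lands on position 0
theorem pvFindBack_prefix (h : String) (buf z : List String)
    (hh : pvHasOpen h = true) (hb : ∀ x ∈ buf, pvHasOpen x = false) :
    ∀ t, t ≤ buf.length → pvFindBack (h :: buf ++ z) (t + 1) = some 0 := by
  intro t
  induction t with
  | zero =>
    intro _
    rw [pvFindBack_succ]
    show (if pvHasOpen h = true then some 0 else pvFindBack (h :: buf ++ z) 0) = some 0
    rw [if_pos hh]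
  | succ t ih =>
    intro ht
    rw [pvFindBack_succ]
    show (if pvHasOpen ((buf ++ z).getD t "") = true then some (t + 1)
      else pvFindBack (h :: buf ++ z) (t + 1)) = some 0
    rw [List.getD_append _ _ _ _ (show t < buf.length by omega)]
    have hbo : pvHasOpen (buf.getD t "") = false := by
      have htl : t < buf.length := by omega
      rw [List.getD_eq_getElem _ _ htl]
      exact hb _ (List.getElem_mem htl)
    rw [hbo]
    simpa using ih (by omega)

theorem pvFlatMap_nil {α : Type} (n : Nat) (f : Nat → List α)
    (h : ∀ i, i < n → f i = []) : (List.range n).flatMap f = [] := by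
  rw [List.flatMap_eq_nil_iff]
  intro i hi
  exact h i (List.mem_range.mp hi)

theorem pvMergeIdx_decomp (p z : List String)
    (h0 : ∀ i, i < p.length → pvChunk (p ++ z) i = []) :
    pvMergeIdxN (p ++ z) =
      (List.range z.length).flatMap (fun r => pvChunk (p ++ z) (p.length + r)) := by
  unfold pvMergeIdxN
  rw [List.length_append, List.range_add, List.flatMap_append, List.flatMap_map]
  rw [pvFlatMap_nil p.length (pvChunk (p ++ z)) h0, List.nil_append]

theorem pvChunk_corr (p z : List String) (r : Nat)
    (hpscan : pvFindBack (p ++ z) p.length = none) :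
    pvChunk (p ++ z) (p.length + r) =
      (pvChunk z r).map (fun q => (q.1 + p.length, q.2 + p.length)) := by
  unfold pvChunk
  rw [pvGetD_append_right, pvFindBack_append p z r]
  cases hfb : pvFindBack z r with
  | some t => split <;> simp [Nat.add_comm]
  | none => rw [hpscan]; split <;> simp

theorem pvChunk_corr_some (p z : List String) (r t : Nat)
    (hsome : pvFindBack z r = some t) :
    pvChunk (p ++ z) (p.length + r) =
      (pvChunk z r).map (fun q => (q.1 + p.length, q.2 + p.length)) := by
  unfold pvChunk
  rw [pvGetD_append_right, pvFindBack_append p z r, hsome]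
  split <;> simp [Nat.add_comm]

theorem pvChunk_prefix_nil (h : String) (buf z : List String)
    (hb : ∀ x ∈ buf, pvFlag x = false) :
    ∀ i, i < buf.length + 1 → pvChunk ((h :: buf) ++ z) i = [] := by
  intro i hi
  cases i with
  | zero => exact pvChunk_zero _
  | succ t =>
    unfold pvChunk
    have hg : ((h :: buf) ++ z).getD (t + 1) "" = buf.getD t "" := by
      show (buf ++ z).getD t "" = buf.getD t ""
      exact List.getD_append _ _ _ _ (by omega)
    rw [hg]
    have hfl : pvFlag (buf.getD t "") = false := by
      have htl : t < buf.length := by omega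
      rw [List.getD_eq_getElem _ _ htl]
      exact hb _ (List.getElem_mem htl)
    rw [if_neg (by rw [hfl]; simp)]

-- a list headed by a '('-column always has a backward match from any later position
theorem pvFindBack_head_open (c : String) (cs : List String) (hc : pvHasOpen c = true) :
    ∀ r, ∃ t, pvFindBack (c :: cs) (r + 1) = some t := by
  intro r
  have := pvFindBack_append [c] cs r
  simp only [List.length_cons, List.length_nil, List.singleton_append] at this
  cases hfb : pvFindBack cs r with
  | some u =>
    rw [hfb] at this
    exact ⟨1 + u, by rw [show r + 1 = 1 + r from by omega]; exact this⟩
  | none =>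
    rw [hfb] at this
    rw [pvFindBack_succ, List.getD_cons_zero, if_pos hc] at this
    exact ⟨0, by rw [show r + 1 = 1 + r from by omega]; exact this⟩

theorem pvMergeIdx_cons_shift (c : String) (cs : List String) (hc : pvHasOpen c = false) :
    pvMergeIdxN (c :: cs) = (pvMergeIdxN cs).map (fun q => (q.1 + 1, q.2 + 1)) := by
  have hscan : pvFindBack ([c] ++ cs) 1 = none := by
    rw [pvFindBack_succ]
    simp only [List.singleton_append, List.getD_cons_zero]
    rw [hc]
    simp [pvFindBack_zero]
  have hd := pvMergeIdx_decomp [c] cs (by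
    intro i hi
    have : i = 0 := by simpa using Nat.lt_one_iff.mp (by simpa using hi)
    subst this
    exact pvChunk_zero _)
  simp only [List.singleton_append, List.length_cons, List.length_nil] at hd ⊢
  rw [show (c :: cs : List String) = [c] ++ cs from rfl] at hd ⊢
  rw [hd]
  unfold pvMergeIdxN
  rw [List.map_flatMap]
  apply List.flatMap_congr
  intro r _
  have := pvChunk_corr [c] cs r hscan
  simpa using this

theorem pvMergeIdx_nil_of_noflag (h : String) (buf : List String)
    (hb : ∀ x ∈ buf, pvFlag x = false) : pvMergeIdxN (h :: buf) = [] := by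
  unfold pvMergeIdxN
  apply pvFlatMap_nil
  intro i hi
  have := pvChunk_prefix_nil h buf [] hb i (by simpa using hi)
  simpa using this

theorem pvMergeIdx_shift_open (h c : String) (buf cs : List String)
    (hco : pvHasOpen c = true) (hcf : pvFlag c = false)
    (hb : ∀ x ∈ buf, pvFlag x = false) :
    pvMergeIdxN (h :: buf ++ c :: cs) =
      (pvMergeIdxN (c :: cs)).map
        (fun q => (q.1 + (buf.length + 1), q.2 + (buf.length + 1))) := by
  have hd := pvMergeIdx_decomp (h :: buf) (c :: cs) (pvChunk_prefix_nil h buf (c :: cs) hb)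
  rw [show (h :: buf ++ c :: cs : List String) = (h :: buf) ++ (c :: cs) from rfl, hd]
  unfold pvMergeIdxN
  rw [List.map_flatMap]
  apply List.flatMap_congr
  intro r hr
  rw [List.mem_range] at hr
  cases r with
  | zero =>
    rw [pvChunk_zero]
    unfold pvChunk
    have hg : ((h :: buf) ++ c :: cs).getD ((h :: buf).length + 0) "" = c := by
      rw [pvGetD_append_right]
      rfl
    rw [hg, if_neg (by rw [hcf]; simp)]
    rfl
  | succ r' =>
    obtain ⟨t, ht⟩ := pvFindBack_head_open c cs hco r'
    have := pvChunk_corr_some (h :: buf) (c :: cs) (r' + 1) t ht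
    simpa using this

theorem pvFindBack_cons_succ (x : String) (cs : List String) (r : Nat) :
    pvFindBack (x :: cs) (r + 1) =
      match pvFindBack cs r with
      | some u => some (1 + u)
      | none => (if pvHasOpen x = true then some 0 else none) := by
  have happ := pvFindBack_append [x] cs r
  simp only [List.length_cons, List.length_nil, List.singleton_append] at happ
  rw [show r + 1 = 1 + r from by omega, happ]
  cases hfb : pvFindBack cs r with
  | some u => rfl
  | none =>
    rw [pvFindBack_succ, List.getD_cons_zero, pvFindBack_zero]

theorem pvChunk_cons_congr (x y : String) (cs : List String) (r : Nat)
    (hfbeq : pvFindBack (x :: cs) (r + 1) = pvFindBack (y :: cs) (r + 1)) :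
    pvChunk (x :: cs) (r + 1) = pvChunk (y :: cs) (r + 1) := by
  unfold pvChunk
  rw [hfbeq]
  have h1 : (x :: cs).getD (r + 1) "" = cs.getD r "" := rfl
  have h2 : (y :: cs).getD (r + 1) "" = cs.getD r "" := rfl
  rw [h1, h2]

theorem pvMergeIdx_merge (h c c' : String) (buf cs : List String)
    (hh : pvHasOpen h = true) (hb : ∀ x ∈ buf, pvFlag x = false ∧ pvHasOpen x = false)
    (hcf : pvFlag c = true) (hc' : pvHasOpen c' = true)
    (hp : Pre_deal_column_with_value (h :: buf ++ c :: cs)) :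
    pvMergeIdxN (h :: buf ++ c :: cs) =
      (0, buf.length + 1) ::
        (pvMergeIdxN (c' :: cs)).map
          (fun q => (q.1 + (buf.length + 1), q.2 + (buf.length + 1))) := by
  have hd := pvMergeIdx_decomp (h :: buf) (c :: cs)
    (pvChunk_prefix_nil h buf (c :: cs) (fun x hx => (hb x hx).1))
  rw [show (h :: buf ++ c :: cs : List String) = (h :: buf) ++ (c :: cs) from rfl, hd]
  have hm : (h :: buf).length = buf.length + 1 := by simp
  -- split the z-range at r = 0
  rw [show (c :: cs : List String).length = cs.length + 1 from by simp]
  rw [List.range_succ_eq_map, List.flatMap_cons, List.flatMap_map]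
  -- head chunk: r = 0 gives the interval (0, m)
  have hhead : pvChunk ((h :: buf) ++ c :: cs) ((h :: buf).length + 0) = [(0, buf.length + 1)] := by
    unfold pvChunk
    have hg : ((h :: buf) ++ c :: cs).getD ((h :: buf).length + 0) "" = c := by
      rw [pvGetD_append_right]; rfl
    rw [hg, if_pos hcf]
    have hfbm : pvFindBack ((h :: buf) ++ c :: cs) ((h :: buf).length + 0) = some 0 := by
      rw [hm]
      exact pvFindBack_prefix h buf (c :: cs) hh (fun x hx => (hb x hx).2) buf.length (le_refl _)
    rw [hfbm, hm]
  rw [hhead]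
  -- tail chunks
  unfold pvMergeIdxN
  rw [show (c' :: cs : List String).length = cs.length + 1 from by simp]
  rw [List.range_succ_eq_map, List.flatMap_cons, List.flatMap_map, pvChunk_zero, List.nil_append,
    List.map_flatMap, List.singleton_append]
  congr 1
  apply List.flatMap_congr
  intro r' hr'
  rw [List.mem_range] at hr'
  by_cases hfl : pvFlag (cs.getD r' "") = true
  · -- a flagged column: the backward scan must resolve inside c :: cs
    cases hfbcs : pvFindBack cs r' with
    | some u =>
      have hfx : pvFindBack (c :: cs) (r' + 1) = some (1 + u) := by
        rw [pvFindBack_cons_succ, hfbcs]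
      have hfy : pvFindBack (c' :: cs) (r' + 1) = some (1 + u) := by
        rw [pvFindBack_cons_succ, hfbcs]
      rw [pvChunk_corr_some (h :: buf) (c :: cs) (r' + 1) (1 + u) hfx]
      rw [pvChunk_cons_congr c c' cs r' (by rw [hfx, hfy]), hm]
    | none =>
      by_cases hoc : pvHasOpen c = true
      · have hfx : pvFindBack (c :: cs) (r' + 1) = some 0 := by
          rw [pvFindBack_cons_succ, hfbcs, if_pos hoc]
        have hfy : pvFindBack (c' :: cs) (r' + 1) = some 0 := by
          rw [pvFindBack_cons_succ, hfbcs, if_pos hc']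
        rw [pvChunk_corr_some (h :: buf) (c :: cs) (r' + 1) 0 hfx]
        rw [pvChunk_cons_congr c c' cs r' (by rw [hfx, hfy]), hm]
      · -- Pre_ rules this case out
        exfalso
        have hlen : buf.length + 1 + (r' + 1) < ((h :: buf) ++ c :: cs).length := by
          simp; omega
        have hgm : ((h :: buf) ++ c :: cs).getD (buf.length + 1) "" = c := by
          have := pvGetD_append_right (h :: buf) (c :: cs) 0
          rw [hm] at this
          simpa using this
        have hgr : ((h :: buf) ++ c :: cs).getD (buf.length + 1 + (r' + 1)) "" = cs.getD r' "" := by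
          have := pvGetD_append_right (h :: buf) (c :: cs) (r' + 1)
          rw [hm] at this
          exact this
        obtain ⟨k, hk2, hk1, hko⟩ := hp (buf.length + 1 + (r' + 1)) hlen (buf.length + 1)
          (by omega) ⟨by rw [hgm]; exact hcf, by rw [hgr]; exact hfl,
            ⟨0, by omega, by exact hh⟩⟩
        obtain ⟨t, rfl⟩ := Nat.exists_eq_add_of_le hk1
        cases t with
        | zero => rw [show buf.length + 1 + 0 = buf.length + 1 from rfl, hgm] at hko; exact hoc hko
        | succ t'' =>
          have hgt : ((h :: buf) ++ c :: cs).getD (buf.length + 1 + (t'' + 1)) "" =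
              cs.getD t'' "" := by
            have := pvGetD_append_right (h :: buf) (c :: cs) (t'' + 1)
            rw [hm] at this
            exact this
          rw [hgt] at hko
          have := (pvFindBack_none_iff cs r').mp hfbcs t'' (by omega)
          rw [this] at hko
          cases hko
  · -- not flagged: both chunks are empty
    have hgx : ((h :: buf) ++ c :: cs).getD ((h :: buf).length + (r' + 1)) "" = cs.getD r' "" := by
      rw [pvGetD_append_right]; rfl
    unfold pvChunk
    rw [hgx, if_neg hfl]
    have hgy : (c' :: cs).getD (r' + 1) "" = cs.getD r' "" := rfl
    rw [hgy, if_neg hfl]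
    rfl

theorem pvPhase2_shift (M : List (Nat × Nat)) (p l : List String) :
    pvPhase2 (p ++ l) (M.map (fun q => (q.1 + p.length, q.2 + p.length))) =
      p ++ pvPhase2 l M := by
  induction M with
  | nil => rfl
  | cons q M' ih =>
    obtain ⟨j, i⟩ := q
    rw [List.map_cons]
    unfold pvPhase2 at ih ⊢
    rw [List.foldr_cons, List.foldr_cons, ih]
    unfold pvMergeAtN
    simp only []
    rw [show j + p.length = p.length + j from by omega]
    rw [show i + p.length + 1 = p.length + (i + 1) from by omega]
    rw [List.take_length_add_append, List.drop_length_add_append, List.drop_length_add_append]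
    rw [show p.length + (i + 1) - (p.length + j) = i + 1 - j from by omega]
    simp [List.append_assoc]

theorem pvPhase2_prefix_linear (M : List (Nat × Nat)) (cs : List String) :
    ∃ t ρ, ∀ x : String, pvPhase2 (x :: cs) M = (x ++ t) :: ρ := by
  induction M with
  | nil =>
    refine ⟨"", cs, fun x => ?_⟩
    rw [String.append_empty]
    rfl
  | cons q M' ih =>
    obtain ⟨t, ρ, hM'⟩ := ih
    obtain ⟨j, i⟩ := q
    have hstep : ∀ x : String, pvPhase2 (x :: cs) ((j, i) :: M') =
        pvMergeAtN ((x ++ t) :: ρ) j i := by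
      intro x
      unfold pvPhase2 at hM' ⊢
      rw [List.foldr_cons, hM' x]
    cases j with
    | zero =>
      cases hS : ρ.take i with
      | nil =>
        refine ⟨t, ρ.drop i, fun x => ?_⟩
        rw [hstep x]
        unfold pvMergeAtN
        simp only [List.take_zero, List.drop_zero, Nat.sub_zero, List.take_succ_cons,
          List.drop_succ_cons, hS]
        rfl
      | cons y ys =>
        refine ⟨t ++ (" , " ++ pvJoinSep (y :: ys)), ρ.drop i, fun x => ?_⟩
        rw [hstep x]
        unfold pvMergeAtN
        simp only [List.take_zero, List.drop_zero, Nat.sub_zero, List.take_succ_cons,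
          List.drop_succ_cons, hS]
        rw [pvJoinSep_cons_cons]
        simp [String.append_assoc]
    | succ j' =>
      refine ⟨t, ρ.take j' ++ [pvJoinSep ((ρ.drop j').take (i + 1 - (j' + 1)))] ++ ρ.drop i,
        fun x => ?_⟩
      rw [hstep x]
      unfold pvMergeAtN
      simp only [List.take_succ_cons, List.drop_succ_cons]
      rfl

-- ===== Pre_ closure lemmas =====

theorem pvPre_tail (x : String) (l : List String)
    (h : Pre_deal_column_with_value (x :: l)) : Pre_deal_column_with_value l := by
  intro i2 h2 i1 h1 ⟨f1, f2, j, hj, ho⟩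
  obtain ⟨k, hk2, hk1, hko⟩ := h (i2 + 1) (by simp; omega) (i1 + 1) (by omega)
    ⟨f1, f2, ⟨j + 1, by omega, ho⟩⟩
  obtain ⟨k', rfl⟩ : ∃ k', k = k' + 1 := ⟨k - 1, by omega⟩
  exact ⟨k', by omega, by omega, hko⟩

theorem pvPre_drop_prefix (p l : List String)
    (h : Pre_deal_column_with_value (p ++ l)) : Pre_deal_column_with_value l := by
  induction p with
  | nil => exact h
  | cons x p ih => exact ih (pvPre_tail x (p ++ l) h)

theorem pvPre_merge (h c c' : String) (buf cs : List String)
    (hh : pvHasOpen h = true)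
    (hp : Pre_deal_column_with_value (h :: buf ++ c :: cs)) :
    Pre_deal_column_with_value (c' :: cs) := by
  intro i2 h2 i1 h1 ⟨f1, f2, j, hj, ho⟩
  obtain ⟨r1, rfl⟩ : ∃ r1, i1 = r1 + 1 := by
    cases i1 with
    | zero => omega
    | succ r => exact ⟨r, rfl⟩
  obtain ⟨r2, rfl⟩ : ∃ r2, i2 = r2 + 1 := by
    cases i2 with
    | zero => omega
    | succ r => exact ⟨r, rfl⟩
  have hg : ∀ r : Nat, ((h :: buf) ++ (c :: cs)).getD ((h :: buf).length + (1 + r)) "" =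
      cs.getD r "" := by
    intro r
    rw [pvGetD_append_right, show 1 + r = r + 1 from by omega]
    rfl
  have hlen2 : (h :: buf).length + (1 + r2) < ((h :: buf) ++ (c :: cs)).length := by
    simp only [List.length_append, List.length_cons] at h2 ⊢
    omega
  obtain ⟨k, hk2, hk1, hko⟩ := hp ((h :: buf).length + (1 + r2)) hlen2
    ((h :: buf).length + (1 + r1)) (by omega)
    ⟨by rw [hg r1]; exact f1, by rw [hg r2]; exact f2,
      ⟨0, by simp, hh⟩⟩
  obtain ⟨t, rfl⟩ : ∃ t, k = (h :: buf).length + (1 + t) := by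
    refine ⟨k - (h :: buf).length - 1, ?_⟩
    omega
  rw [hg t] at hko
  exact ⟨t + 1, by omega, by omega, hko⟩

-- ===== port B structure =====

theorem pvFoldB_done (cs : List String) (d₁ d₂ : List String) (hd : Option String)
    (tl : List String) :
    cs.foldl pvStepB (d₁ ++ d₂, hd, tl) =
      (d₁ ++ (cs.foldl pvStepB (d₂, hd, tl)).1,
       (cs.foldl pvStepB (d₂, hd, tl)).2.1, (cs.foldl pvStepB (d₂, hd, tl)).2.2) := by
  induction cs generalizing d₂ hd tl with
  | nil => simp
  | cons c cs ih =>
    rw [List.foldl_cons, List.foldl_cons]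
    have hstep : pvStepB (d₁ ++ d₂, hd, tl) c =
        (d₁ ++ (pvStepB (d₂, hd, tl) c).1,
         (pvStepB (d₂, hd, tl) c).2.1, (pvStepB (d₂, hd, tl) c).2.2) := by
      unfold pvStepB
      cases hd with
      | some hh => split_ifs <;> simp
      | none => split_ifs <;> simp
    rw [hstep, ih]

theorem pvFinishB_append (d D : List String) (hd : Option String) (tl : List String) :
    pvFinishB (d ++ D, hd, tl) = d ++ pvFinishB (D, hd, tl) := by
  cases hd <;> simp [pvFinishB]

theorem pvPhase2_shift_cons (M : List (Nat × Nat)) (h : String) (buf l : List String) :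
    pvPhase2 ((h :: buf) ++ l)
        (M.map (fun q => (q.1 + (buf.length + 1), q.2 + (buf.length + 1)))) =
      (h :: buf) ++ pvPhase2 l M :=
  pvPhase2_shift M (h :: buf) l

theorem pvPhase2_shift_one (M : List (Nat × Nat)) (c : String) (l : List String) :
    pvPhase2 (c :: l) (M.map (fun q => (q.1 + 1, q.2 + 1))) = c :: pvPhase2 l M :=
  pvPhase2_shift M [c] l

-- the merged A-side step: one merge interval collapses the whole open group
theorem pvModelA_merge (h c : String) (buf cs : List String)
    (hop : pvHasOpen h = true)
    (hbuf : ∀ x ∈ buf, pvFlag x = false ∧ pvHasOpen x = false)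
    (hflc : pvFlag c = true)
    (hpre : Pre_deal_column_with_value (h :: buf ++ c :: cs)) :
    pvModelA (h :: buf ++ c :: cs) = pvModelA (pvJoinSep (h :: (buf ++ [c])) :: cs) := by
  have hopJ : pvHasOpen (pvJoinSep (h :: (buf ++ [c]))) = true := pvOpen_joinSep_cons _ _ hop
  have hMI := pvMergeIdx_merge h c (pvJoinSep (h :: (buf ++ [c]))) buf cs hop hbuf hflc hopJ hpre
  unfold pvModelA
  rw [hMI]
  unfold pvPhase2
  rw [List.foldr_cons]
  have hsh := pvPhase2_shift_cons (pvMergeIdxN (pvJoinSep (h :: (buf ++ [c])) :: cs)) h buf (c :: cs)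
  unfold pvPhase2 at hsh
  rw [hsh]
  obtain ⟨t, ρ, hPL⟩ := pvPhase2_prefix_linear (pvMergeIdxN (pvJoinSep (h :: (buf ++ [c])) :: cs)) cs
  unfold pvPhase2 at hPL
  rw [hPL c, hPL (pvJoinSep (h :: (buf ++ [c])))]
  show pvMergeAtN ((h :: buf) ++ (c ++ t) :: ρ) 0 (buf.length + 1) = _
  unfold pvMergeAtN
  simp only [List.take_zero, List.drop_zero, Nat.sub_zero]
  rw [show buf.length + 1 + 1 = (h :: buf).length + 1 from by simp]
  rw [show ((h :: buf).length + 1 : Nat) = (h :: buf).length + 1 from rfl]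
  rw [List.take_length_add_append, List.drop_length_add_append]
  rw [List.nil_append]
  have htake : List.take 1 ((c ++ t) :: ρ) = [c ++ t] := by
    rw [List.take_succ_cons, List.take_zero]
  have hdrop : List.drop 1 ((c ++ t) :: ρ) = ρ := by
    rw [List.drop_succ_cons, List.drop_zero]
  rw [htake, hdrop]
  have hjoin : pvJoinSep ((h :: buf) ++ [c ++ t]) = pvJoinSep (h :: (buf ++ [c])) ++ t := by
    rw [pvJoinSep_snoc]
    have h1 : pvJoinSep (h :: (buf ++ [c])) = pvJoinSep (h :: buf) ++ " , " ++ c :=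
      pvJoinSep_snoc h buf c
    rw [h1]
    simp [String.append_assoc]
  rw [hjoin]
  rfl

-- ===== the main induction =====

theorem pvMain (n : Nat) :
    (∀ (h : String) (buf cs : List String),
      (h :: buf ++ cs).length ≤ n → pvHasOpen h = true →
      (∀ x ∈ buf, pvFlag x = false ∧ pvHasOpen x = false) →
      Pre_deal_column_with_value (h :: buf ++ cs) →
      pvModelA (h :: buf ++ cs) = pvFinishB (cs.foldl pvStepB ([], some h, buf))) := by
  induction n using Nat.strong_induction_on with
  | _ n ihn =>
    intro h buf cs
    induction cs generalizing h buf with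
    | nil =>
      intro _ hop hbuf _
      rw [List.foldl_nil]
      show pvModelA (h :: buf ++ []) = h :: buf
      rw [List.append_nil]
      unfold pvModelA
      rw [pvMergeIdx_nil_of_noflag h buf (fun x hx => (hbuf x hx).1)]
      rfl
    | cons c cs' ihcs =>
      intro hlen hop hbuf hpre
      rw [List.foldl_cons]
      by_cases hflc : pvFlag c = true
      · -- merge: the group absorbs buf and c
        have hstep : pvStepB ([], some h, buf) c =
            ([], some (pvJoinSep (h :: (buf ++ [c]))), []) := by
          unfold pvStepB
          dsimp only []
          rw [if_pos hflc]
        rw [hstep]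
        have hA := pvModelA_merge h c buf cs' hop hbuf hflc hpre
        have hpre' : Pre_deal_column_with_value (pvJoinSep (h :: (buf ++ [c])) :: cs') :=
          pvPre_merge h c _ buf cs' hop hpre
        have hlen' : 1 + cs'.length < n := by
          simp only [List.length_append, List.length_cons] at hlen
          omega
        have hrec := ihn (1 + cs'.length) hlen' (pvJoinSep (h :: (buf ++ [c]))) [] cs'
          (by simp) (pvOpen_joinSep_cons _ _ hop) (by simp) (by simpa using hpre')
        rw [hA]
        simpa using hrec
      · by_cases hoc : pvHasOpen c = true
        · -- a fresh '('-column: flush the group, open a new one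
          have hstep : pvStepB ([], some h, buf) c = (h :: buf, some c, []) := by
            unfold pvStepB
            dsimp only []
            rw [if_neg hflc, if_pos hoc]
            rfl
          rw [hstep]
          have hflc0 : pvFlag c = false := by
            cases hq : pvFlag c
            · rfl
            · exact absurd hq hflc
          have hA : pvModelA (h :: buf ++ c :: cs') = (h :: buf) ++ pvModelA (c :: cs') := by
            unfold pvModelA
            rw [pvMergeIdx_shift_open h c buf cs' hoc hflc0 (fun x hx => (hbuf x hx).1)]
            exact pvPhase2_shift_cons (pvMergeIdxN (c :: cs')) h buf (c :: cs')
          have hpre' : Pre_deal_column_with_value (c :: cs') :=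
            pvPre_drop_prefix (h :: buf) (c :: cs') hpre
          have hlen' : 1 + cs'.length < n := by
            simp only [List.length_append, List.length_cons] at hlen
            omega
          have hrec := ihn (1 + cs'.length) hlen' c [] cs' (by simp) hoc (by simp)
            (by simpa using hpre')
          rw [hA]
          have hfold := pvFoldB_done cs' (h :: buf) [] (some c) []
          rw [show ((h :: buf : List String), (some c : Option String), ([] : List String)) =
            ((h :: buf : List String) ++ [], (some c : Option String), ([] : List String)) from by simp]
          rw [hfold]
          rw [show ((h :: buf) ++ (cs'.foldl pvStepB ([], some c, [])).1,
              (cs'.foldl pvStepB ([], some c, [])).2.1,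
              (cs'.foldl pvStepB ([], some c, [])).2.2) =
            ((h :: buf) ++ (cs'.foldl pvStepB ([], some c, [])).1,
              (cs'.foldl pvStepB ([], some c, [])).2) from rfl]
          rw [pvFinishB_append (h :: buf) _ _ _]
          rw [show pvModelA (c :: cs') = pvModelA (c :: [] ++ cs') from rfl]
          rw [hrec]
        · -- an ordinary column: it joins the pending tail
          have hflc' : pvFlag c = false := by
            cases hq : pvFlag c
            · rfl
            · exact absurd hq hflc
          have hoc' : pvHasOpen c = false := by
            cases hq : pvHasOpen c
            · rfl
            · exact absurd hq hoc
          have hstep : pvStepB ([], some h, buf) c = ([], some h, buf ++ [c]) := by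
            unfold pvStepB
            dsimp only []
            rw [if_neg hflc, if_neg hoc]
          rw [hstep]
          have hassoc : (h :: buf ++ c :: cs' : List String) = h :: (buf ++ [c]) ++ cs' := by
            simp
          have hbuf' : ∀ x ∈ buf ++ [c], pvFlag x = false ∧ pvHasOpen x = false := by
            intro x hx
            rcases List.mem_append.mp hx with hx | hx
            · exact hbuf x hx
            · rw [List.mem_singleton.mp hx]
              exact ⟨hflc', hoc'⟩
          have := ihcs h (buf ++ [c])
          rw [hassoc] at hlen hpre
          exact (hassoc ▸ (ihcs h (buf ++ [c]) (by simpa using hlen) hop hbuf' hpre))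

theorem pvTop (cs : List String) (hp : Pre_deal_column_with_value cs) :
    pvModelA cs = deal_column_with_value_alt cs := by
  induction cs with
  | nil => rfl
  | cons c cs' ih =>
    unfold deal_column_with_value_alt
    rw [List.foldl_cons]
    by_cases hoc : pvHasOpen c = true
    · by_cases hflc : pvFlag c = true
      · have hstep : pvStepB ([], none, []) c = ([], some c, []) := by
          unfold pvStepB
          dsimp only []
          rw [if_pos hoc]
        rw [hstep]
        have := pvMain (c :: cs').length c [] cs' (by simp) hoc (by simp) (by simpa using hp)
        simpa using this
      · have hstep : pvStepB ([], none, []) c = ([], some c, []) := by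
          unfold pvStepB
          dsimp only []
          rw [if_pos hoc]
        rw [hstep]
        have := pvMain (c :: cs').length c [] cs' (by simp) hoc (by simp) (by simpa using hp)
        simpa using this
    · have hoc' : pvHasOpen c = false := by
        cases hq : pvHasOpen c
        · rfl
        · exact absurd hq hoc
      have hstep : pvStepB ([], none, []) c = ([c], none, []) := by
        unfold pvStepB
        dsimp only []
        rw [if_neg hoc]
        rfl
      rw [hstep]
      have hA : pvModelA (c :: cs') = c :: pvModelA cs' := by
        unfold pvModelA
        rw [pvMergeIdx_cons_shift c cs' hoc']
        exact pvPhase2_shift_one (pvMergeIdxN cs') c cs'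
      have hfold := pvFoldB_done cs' [c] [] none []
      rw [show (([c] : List String), (none : Option String), ([] : List String)) =
        (([c] : List String) ++ [], (none : Option String), ([] : List String)) from by simp]
      rw [hfold]
      rw [show (([c] : List String) ++ (cs'.foldl pvStepB ([], none, [])).1,
          (cs'.foldl pvStepB ([], none, [])).2.1,
          (cs'.foldl pvStepB ([], none, [])).2.2) =
        (([c] : List String) ++ (cs'.foldl pvStepB ([], none, [])).1,
          (cs'.foldl pvStepB ([], none, [])).2) from rfl]
      rw [pvFinishB_append [c] _ _ _]
      rw [hA, ih (pvPre_tail c cs' hp)]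
      rfl

-- ===== VERDICT (by name: the statement is the Claim_ definition above) =====
theorem deal_column_with_value_spec : Claim_equal_deal_column_with_value := by
  intro l _ hp
  unfold Spec_deal_column_with_value
  rw [pvPortA_model l hp, pvTop l hp]
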